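-- pv_equiv track=rewrite | github.com/SaundersLab/marple | workflow/scripts/virulence_fungicide_multiqc_row.py | alignment_mapping
-- ===== SOURCE A (Python) =====
-- def alignment_mapping(aligned_seq):
--     alignment_map = {}
--     unaligned_pos = 0
--     for aligned_pos, aa in enumerate(aligned_seq):
--         if aa != '-':
--             unaligned_pos += 1
--         alignment_map[aligned_pos] = unaligned_pos
--     return alignment_map
-- ===== SOURCE B (Python) =====
-- def alignment_mapping(aligned_seq):
--     # Back-to-front pass: start from the total number of non-gap characters and
--     # subtract while walking right-to-left, so each position gets the count of
--     # non-gaps in the prefix ending at it; then rebuild the dict in ascending order.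
--     remaining = sum(aa != '-' for aa in aligned_seq)
--     pairs = []
--     for i in range(len(aligned_seq) - 1, -1, -1):
--         pairs.append((i, remaining))
--         if aligned_seq[i] != '-':
--             remaining -= 1
--     return dict(reversed(pairs))
-- ===== Notes on version B (the rewrite author's own statement) =====
-- stated objective: alternative
-- what changed: Replaces A's forward pass that mutates a running non-gap counter inside the dict-building loop by a right-to-left pass that starts from the total non-gap count and subtracts at each non-gap character, collecting (index, count) pairs back-to-front and rebuilding the dict from the reversed pair list.
import Mathlib
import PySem

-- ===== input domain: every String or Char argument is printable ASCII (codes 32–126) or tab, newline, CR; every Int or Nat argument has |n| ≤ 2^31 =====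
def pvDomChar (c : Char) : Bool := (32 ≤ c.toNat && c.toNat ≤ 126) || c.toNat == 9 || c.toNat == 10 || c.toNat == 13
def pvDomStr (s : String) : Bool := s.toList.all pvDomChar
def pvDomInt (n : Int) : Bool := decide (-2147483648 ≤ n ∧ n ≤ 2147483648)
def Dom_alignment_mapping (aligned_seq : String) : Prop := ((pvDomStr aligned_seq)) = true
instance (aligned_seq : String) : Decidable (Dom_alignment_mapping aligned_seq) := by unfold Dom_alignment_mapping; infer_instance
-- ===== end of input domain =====

-- B replaces A's forward pass with a running counter by a right-to-left pass that
-- starts from the total non-gap count and subtracts (alternative decomposition, same cost).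

-- ===== PORT A =====
-- literal port of A: forward loop over enumerate, running counter, dict insertions
def alignment_mapping (aligned_seq : String) : List (Int × Int) :=
  ((PySem.List.enumerate aligned_seq.toList 0).foldl
      (fun (st : PySem.Dict Int Int × Int) p =>
        let u := if p.2 ≠ '-' then st.2 + 1 else st.2
        (st.1.insert p.1 u, u))
      (PySem.Dict.empty, 0)).1.items

-- ===== PORT B =====
-- literal port of Source B: total non-gap count, countdown loop building pairs, dict(reversed(pairs))
-- (aligned_seq[i] is in range for every i the loop visits, so the default of pyGetD is never used)
def alignment_mapping_alt (aligned_seq : String) : List (Int × Int) :=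
  let l := aligned_seq.toList
  let remaining : Int := l.foldl (fun acc aa => if aa ≠ '-' then acc + 1 else acc) 0
  let res := (PySem.List.pyRange ((PySem.Chars.len l : Int) - 1) (-1) (-1)).foldl
      (fun (st : List (Int × Int) × Int) i =>
        (st.1 ++ [(i, st.2)],
         if PySem.List.pyGetD l i ' ' ≠ '-' then st.2 - 1 else st.2))
      ([], remaining)
  (PySem.Dict.ofList res.1.reverse).items

-- ===== PRECONDITION & SPEC =====
def Spec_alignment_mapping (aligned_seq : String) (out : List (Int × Int)) : Prop := out = alignment_mapping_alt aligned_seq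
instance (aligned_seq : String) (out : List (Int × Int)) : Decidable (Spec_alignment_mapping aligned_seq out) := by unfold Spec_alignment_mapping; infer_instance

-- ===== CLAIM (what is proved, stated in full; the proofs are below) =====
def Claim_equal_alignment_mapping : Prop := ∀ (aligned_seq : String), Dom_alignment_mapping aligned_seq → Spec_alignment_mapping aligned_seq (alignment_mapping aligned_seq)

-- ===== LEMMAS AND PROOFS =====

-- number of non-gap characters, as an Int
def cntNG (l : List Char) : Int := (l.countP (fun c => c ≠ '-') : Int)

lemma cntNG_cons (c : Char) (t : List Char) :
    cntNG (c :: t) = (if c ≠ '-' then 1 else 0) + cntNG t := by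
  by_cases h : c = '-' <;> simp [cntNG, h] <;> ring

lemma cntNG_append (a b : List Char) : cntNG (a ++ b) = cntNG a + cntNG b := by
  simp [cntNG, List.countP_append]

-- A's loop, generalized: fresh ascending keys append to the dict's items
lemma A_loop (l : List Char) (s u : Int) (d : PySem.Dict Int Int)
    (h : ∀ k ∈ d.keys, k < s) :
    ((PySem.List.enumerate l s).foldl
        (fun (st : PySem.Dict Int Int × Int) p =>
          let u := if p.2 ≠ '-' then st.2 + 1 else st.2
          (st.1.insert p.1 u, u))
        (d, u)).1.items
      = d.items ++ (List.range l.length).map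
          (fun (k : Nat) => (s + (k : Int), u + cntNG (l.take (k + 1)))) := by
  induction l generalizing s u d with
  | nil => simp [PySem.List.enumerate_nil]
  | cons c cs ih =>
    rw [PySem.List.enumerate_cons, List.foldl_cons]
    have hc : d.contains s = false := by
      by_contra hco
      have : s ∈ d.keys := (PySem.Dict.contains_iff_mem_keys d s).1 (by
        cases hcs : d.contains s with
        | false => exact absurd hcs hco
        | true => rfl)
      exact absurd (h s this) (lt_irrefl s)
    have h' : ∀ k ∈ (d.insert s (if c ≠ '-' then u + 1 else u)).keys, k < s + 1 := by
      intro k hk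
      rcases (PySem.Dict.mem_keys_insert d s k _).1 hk with hk | hk
      · omega
      · have := h k hk; omega
    show (List.foldl (fun (st : PySem.Dict Int Int × Int) p =>
          let u := if p.2 ≠ '-' then st.2 + 1 else st.2
          (st.1.insert p.1 u, u))
        (d.insert s (if c ≠ '-' then u + 1 else u), if c ≠ '-' then u + 1 else u)
        (PySem.List.enumerate cs (s + 1))).1.items = _
    rw [ih (s + 1) _ _ h']
    rw [PySem.Dict.items_insert_of_not_contains d _ hc]
    rw [List.length_cons, List.range_succ_eq_map, List.map_cons, List.map_map,
      List.append_assoc, List.singleton_append]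
    congr 1
    congr 1
    · simp only [Nat.cast_zero, add_zero, zero_add, List.take_succ_cons, List.take_zero,
        cntNG_cons]
      have h0 : cntNG [] = 0 := by simp [cntNG]
      rw [h0]
      split_ifs <;> simp
    · apply List.map_congr_left
      intro k _
      simp only [Function.comp_apply, Nat.succ_eq_add_one, List.take_succ_cons, cntNG_cons]
      refine Prod.ext ?_ ?_
      · show s + 1 + (k : Int) = s + ((k : Nat) + 1 : Nat)
        push_cast; ring
      · show (if c ≠ '-' then u + 1 else u) + cntNG (cs.take (k + 1))
            = u + ((if c ≠ '-' then 1 else 0) + cntNG (cs.take (k + 1)))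
        split_ifs <;> ring

-- B's countdown loop, generalized
lemma B_loop (l : List Char) (m : Nat) (hm : m ≤ l.length) (acc : List (Int × Int)) (rem : Int) :
    ((PySem.List.pyRange ((m : Int) - 1) (-1) (-1)).foldl
        (fun (st : List (Int × Int) × Int) i =>
          (st.1 ++ [(i, st.2)],
           if PySem.List.pyGetD l i ' ' ≠ '-' then st.2 - 1 else st.2))
        (acc, rem)).1
      = acc ++ (List.range m).reverse.map
          (fun (i : Nat) => ((i : Int), rem - (cntNG (l.take m) - cntNG (l.take (i + 1))))) := by
  induction m generalizing acc rem with
  | zero => rw [PySem.List.pyRange_neg_one_eq_nil (by norm_num)]; simp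
  | succ m ih =>
    have hlt : m < l.length := hm
    have hcast : ((m + 1 : Nat) : Int) - 1 = (m : Int) := by push_cast; ring
    rw [hcast, PySem.List.pyRange_neg_one_cons (by omega), List.foldl_cons]
    show (List.foldl
        (fun (st : List (Int × Int) × Int) i =>
          (st.1 ++ [(i, st.2)],
           if PySem.List.pyGetD l i ' ' ≠ '-' then st.2 - 1 else st.2))
        (acc ++ [((m : Int), rem)],
         if PySem.List.pyGetD l (m : Int) ' ' ≠ '-' then rem - 1 else rem)
        (PySem.List.pyRange ((m : Int) - 1) (-1) (-1))).1 = _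
    rw [ih (le_of_lt hlt) (acc ++ [((m : Int), rem)]) _]
    have hgm : PySem.List.pyGetD l (m : Int) ' ' = l[m] := by
      rw [PySem.List.pyGetD_natCast, List.getD_eq_getElem?_getD, List.getElem?_eq_getElem hlt]
      rfl
    have hsplit : cntNG (l.take (m + 1)) = cntNG (l.take m) + (if l[m] ≠ '-' then 1 else 0) := by
      rw [List.take_add_one, List.getElem?_eq_getElem hlt]
      simp only [Option.toList_some, cntNG_append, cntNG_cons]
      have h0 : cntNG [] = 0 := by simp [cntNG]
      rw [h0]; ring
    rw [List.range_succ, List.reverse_append, List.reverse_singleton, List.map_append,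
      List.map_singleton, List.append_assoc]
    congr 1
    congr 1
    · simp
    · apply List.map_congr_left
      intro i _
      refine Prod.ext rfl ?_
      show (if PySem.List.pyGetD l (m : Int) ' ' ≠ '-' then rem - 1 else rem)
            - (cntNG (l.take m) - cntNG (l.take (i + 1)))
          = rem - (cntNG (l.take (m + 1)) - cntNG (l.take (i + 1)))
      rw [hgm, hsplit]
      split_ifs <;> ring

-- closed form of A's port
lemma a_eq (s : String) : alignment_mapping s
    = (List.range s.toList.length).map
        (fun (k : Nat) => ((k : Int), cntNG (s.toList.take (k + 1)))) := by
  unfold alignment_mapping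
  rw [A_loop s.toList 0 0 PySem.Dict.empty (by
    intro k hk
    exact absurd hk (by simp [PySem.Dict.keys, PySem.Dict.empty]))]
  simp [PySem.Dict.empty]

-- closed form of B's port
lemma alt_eq (s : String) : alignment_mapping_alt s
    = (List.range s.toList.length).map
        (fun (k : Nat) => ((k : Int), cntNG (s.toList.take (k + 1)))) := by
  unfold alignment_mapping_alt
  have hrem := PySem.List.foldl_count_if (fun c => decide (c ≠ '-')) s.toList 0
  simp only [decide_eq_true_eq] at hrem
  simp only [hrem, PySem.Chars.len_eq]
  rw [B_loop s.toList s.toList.length le_rfl [] _]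
  simp only [List.nil_append, List.take_length, PySem.Dict.ofList, PySem.Dict.update]
  rw [← List.map_reverse, List.reverse_reverse]
  rw [PySem.Dict.items_foldl_insert_fresh _ Prod.fst Prod.snd PySem.Dict.empty
    (by intro a _; exact PySem.Dict.contains_empty a.1)
    (by
      simp only [List.map_map]
      exact List.Nodup.map (fun a b h => by simpa using h) List.nodup_range)]
  simp only [PySem.Dict.empty, List.nil_append, List.map_map]
  apply List.map_congr_left
  intro k _
  refine Prod.ext rfl ?_
  simp only [Function.comp_apply, cntNG]
  ring

-- ===== VERDICT (by name: the statement is the Claim_ definition above) =====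
theorem alignment_mapping_spec : Claim_equal_alignment_mapping := by
  intro s _
  unfold Spec_alignment_mapping
  rw [a_eq, alt_eq]
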